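-- pv_equiv track=rewrite | github.com/programmic/pixelsorting | scripts/passes.py | split_connected_chunks
-- ===== SOURCE A (Python) =====
-- def split_connected_chunks(v_chunks: list[list[tuple[int, int]]]) -> list[list[tuple[int, int]]]: #globalignore
--     out = []
--
--     for v_chunk in v_chunks:
--         if not v_chunk:
--             continue
--
--         group = [v_chunk[0]]
--         for i in range(1, len(v_chunk)):
--             prev = v_chunk[i - 1]
--             curr = v_chunk[i]
--
--             # prüfen, ob direkt angrenzend (hier: vertikal -> y-Wert +1)
--             if curr[1] == prev[1] + 1:
--                 group.append(curr)
--             else: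
--                 out.append(group)
--                 group = [curr]
--
--         out.append(group)
--
--     return out
-- ===== SOURCE B (Python) =====
-- def split_connected_chunks(v_chunks: list[list[tuple[int, int]]]) -> list[list[tuple[int, int]]]:
--     out = []
--     for chunk in v_chunks:
--         if chunk:
--             # pass 1: find the cut positions where the vertical run breaks
--             cuts = [0] + [i for i in range(1, len(chunk)) if chunk[i][1] != chunk[i - 1][1] + 1] + [len(chunk)]
--             # pass 2: slice the chunk between consecutive cut positions
--             out.extend(chunk[a:b] for a, b in zip(cuts, cuts[1:]))
--     return out
-- ===== Notes on version B (the rewrite author's own statement) =====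
-- stated objective: alternative
-- what changed: Replaces A's single-pass accumulator with manual flush by two staged passes per chunk: first compute the list of cut indices where the y-run breaks, then slice the chunk between consecutive cuts.
import Mathlib
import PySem

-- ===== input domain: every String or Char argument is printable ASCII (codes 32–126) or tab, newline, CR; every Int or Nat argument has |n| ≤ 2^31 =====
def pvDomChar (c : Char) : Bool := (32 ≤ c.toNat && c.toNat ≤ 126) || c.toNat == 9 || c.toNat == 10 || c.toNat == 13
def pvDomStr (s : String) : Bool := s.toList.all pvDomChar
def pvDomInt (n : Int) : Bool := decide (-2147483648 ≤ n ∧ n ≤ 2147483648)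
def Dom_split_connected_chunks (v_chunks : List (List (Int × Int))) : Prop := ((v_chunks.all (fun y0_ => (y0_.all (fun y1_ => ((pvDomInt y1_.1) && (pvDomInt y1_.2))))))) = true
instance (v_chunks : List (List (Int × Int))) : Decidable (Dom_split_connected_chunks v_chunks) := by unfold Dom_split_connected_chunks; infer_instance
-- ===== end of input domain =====

-- B replaces A's single-pass accumulator with two staged passes per chunk: compute the
-- cut indices where the y-run breaks, then slice between consecutive cuts (objective: alternative; same cost).

-- ===== PORT A =====
-- the body of A's inner 'for i in range(1, len(v_chunk))' loop; state = (out, group)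
def pvStepA (v_chunk : List (Int × Int))
    (st : List (List (Int × Int)) × List (Int × Int)) (i : Int) :
    List (List (Int × Int)) × List (Int × Int) :=
  let prev := PySem.List.pyGetD v_chunk (i - 1) (0, 0)
  let curr := PySem.List.pyGetD v_chunk i (0, 0)
  if curr.2 = prev.2 + 1 then (st.1, st.2 ++ [curr])
  else (st.1 ++ [st.2], [curr])

def split_connected_chunks (v_chunks : List (List (Int × Int))) : List (List (Int × Int)) :=
  v_chunks.foldl (fun out v_chunk =>
    match v_chunk with
    | [] => out
    | c0 :: _ =>
      let st := (PySem.List.pyRange 1 (v_chunk.length : Int) 1).foldl (pvStepA v_chunk) (out, [c0])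
      st.1 ++ [st.2]) []

-- ===== PORT B =====
-- pass 1: cut indices [0] + breaks + [len]; pass 2: slices between consecutive cuts
def pvCuts (chunk : List (Int × Int)) : List Int :=
  [0] ++ ((PySem.List.pyRange 1 (chunk.length : Int) 1).filter (fun i =>
      ¬ ((PySem.List.pyGetD chunk i (0, 0)).2 = (PySem.List.pyGetD chunk (i - 1) (0, 0)).2 + 1)))
    ++ [(chunk.length : Int)]

def split_connected_chunks_alt (v_chunks : List (List (Int × Int))) : List (List (Int × Int)) :=
  v_chunks.foldl (fun out chunk =>
    if chunk ≠ [] then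
      let cuts := pvCuts chunk
      out ++ ((cuts.zip cuts.tail).map (fun p => PySem.List.slice chunk (some p.1) (some p.2)))
    else out) []

-- ===== PRECONDITION & SPEC =====
def Spec_split_connected_chunks (v_chunks : List (List (Int × Int))) (out : List (List (Int × Int))) : Prop := out = split_connected_chunks_alt v_chunks
instance (v_chunks : List (List (Int × Int))) (out : List (List (Int × Int))) : Decidable (Spec_split_connected_chunks v_chunks out) := by unfold Spec_split_connected_chunks; infer_instance

-- ===== CLAIM (what is proved, stated in full; the proofs are below) =====
def Claim_equal_split_connected_chunks : Prop := ∀ (v_chunks : List (List (Int × Int))), Dom_split_connected_chunks v_chunks → Spec_split_connected_chunks v_chunks (split_connected_chunks v_chunks)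

-- ===== LEMMAS AND PROOFS =====

-- take (s+1) of a drop, extended one element at a time
theorem pv_take_snoc (l : List (Int × Int)) (p s : Nat) (hp : p ≤ s) (hs : s < l.length) :
    (l.drop p).take (s - p) ++ [l.getD s (0, 0)] = (l.drop p).take (s + 1 - p) := by
  have hget : (l.drop p)[s - p]? = some (l.getD s (0, 0)) := by
    rw [List.getElem?_drop]
    have : p + (s - p) = s := by omega
    rw [this]
    simp [List.getD, List.getElem?_eq_getElem (by omega : s < l.length)]
  have heq : s + 1 - p = (s - p) + 1 := by omega
  rw [heq, List.take_add_one, hget]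
  simp

-- A's index loop from position s, with group g = chunk[p:s] pending (p the last cut < s),
-- flattens to out followed by the slices between the remaining cuts (p :: breaks[s:] ++ [len]).
theorem pv_inner (l : List (Int × Int)) :
    ∀ (fuel s : Nat) (p : Nat) (out : List (List (Int × Int))),
      l.length - s ≤ fuel → 1 ≤ s → s ≤ l.length → p < s →
      ((PySem.List.pyRange (s : Int) (l.length : Int) 1).foldl (pvStepA l)
          (out, PySem.List.slice l (some (p : Int)) (some (s : Int)))).1 ++
        [((PySem.List.pyRange (s : Int) (l.length : Int) 1).foldl (pvStepA l)
          (out, PySem.List.slice l (some (p : Int)) (some (s : Int)))).2] =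
        out ++ ((((p : Int) ::
            ((PySem.List.pyRange (s : Int) (l.length : Int) 1).filter (fun i =>
              ¬ ((PySem.List.pyGetD l i (0, 0)).2 = (PySem.List.pyGetD l (i - 1) (0, 0)).2 + 1)))
            ++ [(l.length : Int)]).zip
            (((PySem.List.pyRange (s : Int) (l.length : Int) 1).filter (fun i =>
              ¬ ((PySem.List.pyGetD l i (0, 0)).2 = (PySem.List.pyGetD l (i - 1) (0, 0)).2 + 1)))
            ++ [(l.length : Int)])).map
            (fun q => PySem.List.slice l (some q.1) (some q.2))) := by
  intro fuel
  induction fuel with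
  | zero =>
    intro s p out hfuel hs1 hsle hp
    have hs : s = l.length := by omega
    subst hs
    rw [PySem.List.pyRange_one_eq_nil (by omega)]
    simp
  | succ n ih =>
    intro s p out hfuel hs1 hsle hp
    by_cases hend : s = l.length
    · subst hend
      rw [PySem.List.pyRange_one_eq_nil (by omega)]
      simp
    · have hslt : s < l.length := by omega
      rw [PySem.List.pyRange_one_cons (by exact_mod_cast hslt)]
      rw [List.foldl_cons, List.filter_cons]
      have hcurr : PySem.List.pyGetD l (s : Int) (0, 0) = l.getD s (0, 0) := by
        rw [PySem.List.pyGetD_natCast]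
      have hstep : pvStepA l (out, PySem.List.slice l (some (p : Int)) (some (s : Int))) (s : Int) =
          if (PySem.List.pyGetD l (s : Int) (0, 0)).2 =
              (PySem.List.pyGetD l ((s : Int) - 1) (0, 0)).2 + 1 then
            (out, PySem.List.slice l (some (p : Int)) (some (s : Int)) ++
              [PySem.List.pyGetD l (s : Int) (0, 0)])
          else (out ++ [PySem.List.slice l (some (p : Int)) (some (s : Int))],
            [PySem.List.pyGetD l (s : Int) (0, 0)]) := by
        simp [pvStepA]
      have hcast1 : ((s : Int) + 1) = ((s + 1 : Nat) : Int) := by push_cast; ring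
      by_cases hc : (PySem.List.pyGetD l (s : Int) (0, 0)).2 =
          (PySem.List.pyGetD l ((s : Int) - 1) (0, 0)).2 + 1
      · -- connected: group grows, no cut at s
        rw [hstep, if_pos hc, if_neg (by simpa [PySem.List.pyGetD_natCast, List.getD] using hc)]
        have hgrow : PySem.List.slice l (some (p : Int)) (some (s : Int)) ++
            [PySem.List.pyGetD l (s : Int) (0, 0)] =
            PySem.List.slice l (some (p : Int)) (some ((s : Int) + 1)) := by
          rw [hcurr, hcast1, PySem.List.slice_natCast, PySem.List.slice_natCast]
          exact pv_take_snoc l p s (by omega) hslt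
        rw [hgrow, hcast1]
        exact ih (s + 1) p out (by omega) (by omega) (by omega) (by omega)
      · -- break: flush the pending group, cut at s
        rw [hstep, if_neg hc, if_pos (by simpa [PySem.List.pyGetD_natCast, List.getD] using hc)]
        have hsingle : [PySem.List.pyGetD l (s : Int) (0, 0)] =
            PySem.List.slice l (some (s : Int)) (some ((s : Int) + 1)) := by
          rw [hcurr, hcast1, PySem.List.slice_natCast]
          have := pv_take_snoc l s s (le_refl s) hslt
          simpa using this
        rw [hsingle, hcast1]
        rw [ih (s + 1) s (out ++ [PySem.List.slice l (some (p : Int)) (some (s : Int))])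
          (by omega) (by omega) (by omega) (by omega)]
        simp [List.zip_cons_cons, List.append_assoc]

-- ===== VERDICT (by name: the statement is the Claim_ definition above) =====
theorem split_connected_chunks_spec : Claim_equal_split_connected_chunks := by
  intro v_chunks _
  unfold Spec_split_connected_chunks split_connected_chunks split_connected_chunks_alt
  congr 1
  funext out chunk
  cases chunk with
  | nil => simp
  | cons c0 cs =>
    have hg : PySem.List.slice (c0 :: cs) (some ((0 : Nat) : Int)) (some ((1 : Nat) : Int)) = [c0] := by
      rw [PySem.List.slice_natCast]
      simp
    have := pv_inner (c0 :: cs) (c0 :: cs).length 1 0 out (by omega) (by omega)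
      (by simp) (by omega)
    rw [hg] at this
    simp only [Nat.cast_one, Nat.cast_zero] at this
    simp only [this]
    simp [pvCuts]
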